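-- pv_equiv track=rewrite | github.com/owlfox/misc | q2.py | f
-- ===== SOURCE A (Python) =====
-- def f(i):
--     rtn = []
--     for i in range(1,i+1):
--         isDby3 = i % 3 == 0
--         isDby5 = i % 5 == 0
--         if isDby3 and isDby5:
--             rtn.append(i)
--         elif isDby3:
--             pass
--         elif  isDby5:
--             pass
--         else:
--             rtn.append(i)
--     return len(rtn)
-- ===== SOURCE B (Python) =====
-- def f(i):
--     n = max(i, 0)
--     return n - n // 3 - n // 5 + 2 * (n // 15)
-- ===== Notes on version B (the rewrite author's own statement) =====
-- stated objective: faster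
-- what changed: Replaced the O(n) loop that appends qualifying numbers to a list with an O(1) inclusion-exclusion closed form using floor divisions.
import Mathlib
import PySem

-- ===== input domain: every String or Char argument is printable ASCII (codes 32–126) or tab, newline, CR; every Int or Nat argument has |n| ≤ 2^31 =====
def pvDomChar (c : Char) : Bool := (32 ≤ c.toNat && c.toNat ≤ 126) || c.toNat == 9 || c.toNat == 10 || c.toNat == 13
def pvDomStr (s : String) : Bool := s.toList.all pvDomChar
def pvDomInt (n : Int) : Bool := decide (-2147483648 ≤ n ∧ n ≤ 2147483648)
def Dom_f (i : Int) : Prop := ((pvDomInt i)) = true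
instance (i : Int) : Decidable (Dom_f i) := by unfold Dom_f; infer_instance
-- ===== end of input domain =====

-- B replaces A's O(n) list-building loop by an O(1) inclusion-exclusion closed form (objective: faster, asymptotic).

-- ===== PORT A =====
def f (i : Int) : Int :=
  let rtn : List Int := (PySem.List.pyRange 1 (i + 1) 1).foldl
    (fun rtn j =>
      let isDby3 := PySem.Int.mod j 3 == 0
      let isDby5 := PySem.Int.mod j 5 == 0
      if isDby3 && isDby5 then rtn ++ [j]
      else if isDby3 then rtn
      else if isDby5 then rtn
      else rtn ++ [j]) []
  (rtn.length : Int)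

-- ===== PORT B =====
def f_alt (i : Int) : Int :=
  let n := max i 0
  n - PySem.Int.floordiv n 3 - PySem.Int.floordiv n 5 + 2 * PySem.Int.floordiv n 15

-- ===== PRECONDITION & SPEC =====
def Spec_f (i : Int) (out : Int) : Prop := out = f_alt i
instance (i : Int) (out : Int) : Decidable (Spec_f i out) := by unfold Spec_f; infer_instance

-- ===== CLAIM (what is proved, stated in full; the proofs are below) =====
def Claim_equal_f : Prop := ∀ (i : Int), Dom_f i → Spec_f i (f i)

-- ===== LEMMAS AND PROOFS =====

def fKeep (j : Int) : Bool :=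
  (PySem.Int.mod j 3 == 0 && PySem.Int.mod j 5 == 0) ||
  (!(PySem.Int.mod j 3 == 0) && !(PySem.Int.mod j 5 == 0))

theorem f_eq_countP (i : Int) :
    f i = ((PySem.List.pyRange 1 (i + 1) 1).countP fKeep : Int) := by
  unfold f
  have hbody : (fun (rtn : List Int) (j : Int) =>
      let isDby3 := PySem.Int.mod j 3 == 0
      let isDby5 := PySem.Int.mod j 5 == 0
      if isDby3 && isDby5 then rtn ++ [j]
      else if isDby3 then rtn
      else if isDby5 then rtn
      else rtn ++ [j])
    = (fun (rtn : List Int) (j : Int) => if fKeep j then rtn ++ [j] else rtn) := by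
    funext rtn j
    by_cases h3 : (3:Int) ∣ j <;> by_cases h5 : (5:Int) ∣ j <;>
      simp [fKeep, h3, h5]
  rw [hbody, PySem.List.foldl_append_if_eq_filter]
  simp [List.countP_eq_length_filter]

theorem countP_closed (m : Nat) :
    ((PySem.List.pyRange 1 ((m : Int) + 1) 1).countP fKeep : Int)
      = (m : Int) - (m : Int) / 3 - (m : Int) / 5 + 2 * ((m : Int) / 15) := by
  induction m with
  | zero =>
    have h1 : ((0:Nat):Int) + 1 = 1 := by norm_num
    rw [h1, PySem.List.pyRange_one_eq_nil (le_refl (1:Int))]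
    norm_num
  | succ k ih =>
    have hc : ((k + 1 : Nat) : Int) + 1 = ((k : Int) + 1) + 1 := by push_cast; ring
    rw [hc, PySem.List.pyRange_one_succ_right (by omega : (1:Int) ≤ (k:Int) + 1),
      List.countP_append]
    push_cast
    rw [ih]
    have hsing : (List.countP fKeep [(k:Int)+1] : Int)
        = if fKeep ((k:Int)+1) = true then 1 else 0 := by
      by_cases hx : fKeep ((k:Int)+1) = true <;>
        simp [List.countP, List.countP.go, Bool.cond_eq_ite, hx]
    have hfk : fKeep ((k:Int)+1) = true
        ↔ (((3:Int) ∣ ((k:Int)+1) ∧ (5:Int) ∣ ((k:Int)+1))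
            ∨ (¬ (3:Int) ∣ ((k:Int)+1) ∧ ¬ (5:Int) ∣ ((k:Int)+1))) := by
      simp [fKeep]
    rw [hsing]
    by_cases hP : (((3:Int) ∣ ((k:Int)+1) ∧ (5:Int) ∣ ((k:Int)+1))
        ∨ (¬ (3:Int) ∣ ((k:Int)+1) ∧ ¬ (5:Int) ∣ ((k:Int)+1)))
    · rw [if_pos (hfk.mpr hP)]
      rcases hP with ⟨h3, h5⟩ | ⟨h3, h5⟩
      · have e3 := Int.emod_eq_zero_of_dvd h3
        have e5 := Int.emod_eq_zero_of_dvd h5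
        have f3 : ((k:Int)+1)/3 = (k:Int)/3 + 1 := by omega
        have f5 : ((k:Int)+1)/5 = (k:Int)/5 + 1 := by omega
        have f15 : ((k:Int)+1)/15 = (k:Int)/15 + 1 := by omega
        omega
      · have e3 : ((k:Int)+1) % 3 ≠ 0 := fun he => h3 (Int.dvd_of_emod_eq_zero he)
        have e5 : ((k:Int)+1) % 5 ≠ 0 := fun he => h5 (Int.dvd_of_emod_eq_zero he)
        have f3 : ((k:Int)+1)/3 = (k:Int)/3 := by omega
        have f5 : ((k:Int)+1)/5 = (k:Int)/5 := by omega
        have f15 : ((k:Int)+1)/15 = (k:Int)/15 := by omega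
        omega
    · rw [if_neg (fun h => hP (hfk.mp h))]
      by_cases d3 : (3:Int) ∣ ((k:Int)+1) <;> by_cases d5 : (5:Int) ∣ ((k:Int)+1)
      · exact absurd (Or.inl ⟨d3, d5⟩) hP
      · have e3 := Int.emod_eq_zero_of_dvd d3
        have e5 : ((k:Int)+1) % 5 ≠ 0 := fun he => d5 (Int.dvd_of_emod_eq_zero he)
        have e15 : ((k:Int)+1) % 15 ≠ 0 := by omega
        have f3 : ((k:Int)+1)/3 = (k:Int)/3 + 1 := by omega
        have f5 : ((k:Int)+1)/5 = (k:Int)/5 := by omega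
        have f15 : ((k:Int)+1)/15 = (k:Int)/15 := by omega
        omega
      · have e3 : ((k:Int)+1) % 3 ≠ 0 := fun he => d3 (Int.dvd_of_emod_eq_zero he)
        have e5 := Int.emod_eq_zero_of_dvd d5
        have e15 : ((k:Int)+1) % 15 ≠ 0 := by omega
        have f3 : ((k:Int)+1)/3 = (k:Int)/3 := by omega
        have f5 : ((k:Int)+1)/5 = (k:Int)/5 + 1 := by omega
        have f15 : ((k:Int)+1)/15 = (k:Int)/15 := by omega
        omega
      · exact absurd (Or.inr ⟨d3, d5⟩) hP

theorem f_spec : Claim_equal_f := by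
  intro i _
  unfold Spec_f f_alt
  by_cases h : 0 ≤ i
  · have hi : i = ((i.toNat : Nat) : Int) := by omega
    have hmax : max i 0 = i := by omega
    rw [hmax, f_eq_countP, hi, countP_closed]
    simp
  · have hmax : max i 0 = 0 := by omega
    rw [f_eq_countP, PySem.List.pyRange_one_eq_nil (by omega : i + 1 ≤ 1), hmax]
    simp only [PySem.Int.floordiv_eq_ediv_of_pos (show (0:Int) < 3 by norm_num),
      PySem.Int.floordiv_eq_ediv_of_pos (show (0:Int) < 5 by norm_num),
      PySem.Int.floordiv_eq_ediv_of_pos (show (0:Int) < 15 by norm_num)]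
    norm_num
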